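-- pv_equiv track=rewrite | github.com/wenzhengd/lichen | src/lichen/block_structure_analyzer.py | _support_qubits
-- ===== SOURCE A (Python) =====
-- def _support_qubits(labels: tuple[str, ...]) -> tuple[int, ...]:
--     """Return the sorted tuple of qubits touched by a component."""
--
--     if not labels:
--         return ()
--     touched: list[int] = []
--     for index, qubit_letters in enumerate(zip(*labels)):
--         if any(letter != "I" for letter in qubit_letters):
--             touched.append(index)
--     return tuple(touched)
-- ===== SOURCE B (Python) =====
-- def _support_qubits(labels: tuple[str, ...]) -> tuple[int, ...]:
--     """Return the sorted tuple of qubits touched by a component."""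
--     if not labels:
--         return ()
--     width = min(len(label) for label in labels)
--     touched: set[int] = set()
--     for label in labels:
--         for i in range(width):
--             if label[i] != "I":
--                 touched.add(i)
--     return tuple(sorted(touched))
-- ===== Notes on version B (the rewrite author's own statement) =====
-- stated objective: alternative
-- what changed: Replaces the transpose (zip(*labels)) with an in-order column scan: iterates row-major over labels, collects touched positions below the shortest-label width into an unordered set, and sorts it at the end instead of appending column indices in transpose order.
import Mathlib
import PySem

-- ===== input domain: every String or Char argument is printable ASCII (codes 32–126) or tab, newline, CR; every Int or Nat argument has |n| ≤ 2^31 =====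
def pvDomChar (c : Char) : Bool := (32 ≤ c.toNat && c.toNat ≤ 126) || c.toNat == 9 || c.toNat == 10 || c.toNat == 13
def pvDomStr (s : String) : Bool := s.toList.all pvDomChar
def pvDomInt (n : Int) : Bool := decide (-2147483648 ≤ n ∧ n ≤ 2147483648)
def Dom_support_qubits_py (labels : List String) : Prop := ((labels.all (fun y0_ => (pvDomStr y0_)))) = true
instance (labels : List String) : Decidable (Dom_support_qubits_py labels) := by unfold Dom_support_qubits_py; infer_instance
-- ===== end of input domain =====

-- B changes the decomposition (row-major scan into a set, sorted at the end) instead of A's transpose+append; equal output, similar cost.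

-- ===== PORT A =====
-- zip(*labels) is modeled exactly as the columns j < min of the label lengths
-- (Python's zip truncates at the shortest iterable); enumerate supplies the index.
def support_qubits_py (labels : List String) : List Int :=
  if labels.isEmpty then []
  else
    let w : Nat := ((labels.map (fun s => s.toList.length)).min?).getD 0
    (List.range w).foldl
      (fun touched index =>
        if labels.any (fun l => l.toList.getD index 'I' != 'I')
        then touched ++ [(index : Int)] else touched) []

-- ===== PORT B =====
def support_qubits_py_alt (labels : List String) : List Int :=
  if labels.isEmpty then []
  else
    let width : Nat := ((labels.map (fun s => s.toList.length)).min?).getD 0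
    let touched : PySem.Set Int :=
      labels.foldl
        (fun s l =>
          (List.range width).foldl
            (fun s (i : Nat) =>
              if l.toList.getD i 'I' != 'I' then PySem.Set.add s (i : Int) else s) s)
        PySem.Set.empty
    PySem.List.sorted touched (fun x => x) false

-- ===== PRECONDITION & SPEC =====
def Spec_support_qubits_py (labels : List String) (out : List Int) : Prop := out = support_qubits_py_alt labels
instance (labels : List String) (out : List Int) : Decidable (Spec_support_qubits_py labels out) := by unfold Spec_support_qubits_py; infer_instance

-- ===== CLAIM (what is proved, stated in full; the proofs are below) =====
def Claim_equal_support_qubits_py : Prop := ∀ (labels : List String), Dom_support_qubits_py labels → Spec_support_qubits_py labels (support_qubits_py labels)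

-- ===== LEMMAS AND PROOFS =====

-- membership in a fold that conditionally adds f b to a PySem.Set
theorem mem_foldl_add_if {α β : Type} [BEq α] [LawfulBEq α] (q : β → Bool) (f : β → α)
    (L : List β) (s : PySem.Set α) (x : α) :
    (x ∈ L.foldl (fun s b => if q b then PySem.Set.add s (f b) else s) s) ↔
      x ∈ s ∨ ∃ b ∈ L, q b ∧ x = f b := by
  induction L generalizing s with
  | nil => simp
  | cons b t ih =>
    simp only [List.foldl_cons, ih, List.mem_cons]
    by_cases hq : q b
    · simp only [hq, if_pos, PySem.Set.mem_add]
      constructor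
      · rintro ((h | h) | ⟨c, hc, hqc, hx⟩)
        · exact Or.inl h
        · exact Or.inr ⟨b, Or.inl rfl, hq, h⟩
        · exact Or.inr ⟨c, Or.inr hc, hqc, hx⟩
      · rintro (h | ⟨c, (rfl | hc), hqc, hx⟩)
        · exact Or.inl (Or.inl h)
        · exact Or.inl (Or.inr hx)
        · exact Or.inr ⟨c, hc, hqc, hx⟩
    · simp only [hq, if_neg, Bool.false_eq_true, not_false_eq_true]
      constructor
      · rintro (h | ⟨c, hc, hqc, hx⟩)
        · exact Or.inl h
        · exact Or.inr ⟨c, Or.inr hc, hqc, hx⟩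
      · rintro (h | ⟨c, (rfl | hc), hqc, hx⟩)
        · exact Or.inl h
        · exact absurd hqc (by simp [hq])
        · exact Or.inr ⟨c, hc, hqc, hx⟩

theorem nodup_foldl_add_if {α β : Type} [BEq α] [LawfulBEq α] (q : β → Bool) (f : β → α)
    (L : List β) (s : PySem.Set α) (hs : s.Nodup) :
    (L.foldl (fun s b => if q b then PySem.Set.add s (f b) else s) s).Nodup := by
  induction L generalizing s with
  | nil => exact hs
  | cons b t ih =>
    simp only [List.foldl_cons]
    by_cases hq : q b
    · simp only [hq, if_pos]
      exact ih _ (PySem.Set.nodup_add _ _ hs)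
    · simp only [hq, if_neg, Bool.false_eq_true, not_false_eq_true]
      exact ih _ hs

-- membership in B's double fold
theorem mem_touched (labels : List String) (w : Nat) (x : Int) :
    (x ∈ labels.foldl
        (fun s l =>
          (List.range w).foldl
            (fun s (i : Nat) =>
              if l.toList.getD i 'I' != 'I' then PySem.Set.add s (i : Int) else s) s)
        PySem.Set.empty) ↔
      ∃ i ∈ List.range w, (labels.any (fun l => l.toList.getD i 'I' != 'I')) ∧ x = (i : Int) := by
  have key : ∀ (ls : List String) (s : PySem.Set Int),
      (x ∈ ls.foldl
        (fun s l =>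
          (List.range w).foldl
            (fun s (i : Nat) =>
              if l.toList.getD i 'I' != 'I' then PySem.Set.add s (i : Int) else s) s) s) ↔
      x ∈ s ∨ ∃ l ∈ ls, ∃ i ∈ List.range w, (l.toList.getD i 'I' != 'I') ∧ x = (i : Int) := by
    intro ls
    induction ls with
    | nil => simp
    | cons l t ih =>
      intro s
      simp only [List.foldl_cons, ih,
        mem_foldl_add_if (fun i => l.toList.getD i 'I' != 'I') (fun i : Nat => (i : Int)) (List.range w) s x,
        List.mem_cons]
      constructor
      · rintro (((h | h) | ⟨c, hc, i, hi, hq, hx⟩))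
        · exact Or.inl h
        · obtain ⟨i, hi, hq, hx⟩ := h
          exact Or.inr ⟨l, Or.inl rfl, i, hi, hq, hx⟩
        · exact Or.inr ⟨c, Or.inr hc, i, hi, hq, hx⟩
      · rintro (h | ⟨c, (rfl | hc), i, hi, hq, hx⟩)
        · exact Or.inl (Or.inl h)
        · exact Or.inl (Or.inr ⟨i, hi, hq, hx⟩)
        · exact Or.inr ⟨c, hc, i, hi, hq, hx⟩
  rw [key]
  constructor
  · rintro (h | ⟨l, hl, i, hi, hq, hx⟩)
    · simp [PySem.Set.empty] at h
    · exact ⟨i, hi, List.any_eq_true.mpr ⟨l, hl, hq⟩, hx⟩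
  · rintro ⟨i, hi, hq, hx⟩
    obtain ⟨l, hl, hql⟩ := List.any_eq_true.mp hq
    exact Or.inr ⟨l, hl, i, hi, hql, hx⟩

theorem nodup_touched (labels : List String) (w : Nat) :
    (labels.foldl
        (fun s l =>
          (List.range w).foldl
            (fun s (i : Nat) =>
              if l.toList.getD i 'I' != 'I' then PySem.Set.add s (i : Int) else s) s)
        PySem.Set.empty).Nodup := by
  have key : ∀ (ls : List String) (s : PySem.Set Int), s.Nodup →
      (ls.foldl
        (fun s l =>
          (List.range w).foldl
            (fun s (i : Nat) =>
              if l.toList.getD i 'I' != 'I' then PySem.Set.add s (i : Int) else s) s) s).Nodup := by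
    intro ls
    induction ls with
    | nil => exact fun s hs => hs
    | cons l t ih =>
      intro s hs
      exact ih _ (nodup_foldl_add_if _ _ _ _ hs)
  exact key labels PySem.Set.empty List.nodup_nil

-- A's fold is the mapped filter of the index range
theorem portA_eq_filter (labels : List String) (w : Nat) :
    (List.range w).foldl
      (fun touched index =>
        if labels.any (fun l => l.toList.getD index 'I' != 'I')
        then touched ++ [(index : Int)] else touched) [] =
    ((List.range w).filter (fun i => labels.any (fun l => l.toList.getD i 'I' != 'I'))).map
      (fun i : Nat => (i : Int)) := by
  rw [PySem.List.foldl_append_if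
    (fun i => labels.any (fun l => l.toList.getD i 'I' != 'I'))
    (fun i : Nat => (i : Int)) (List.range w) ([] : List Int)]
  exact List.nil_append _

-- ===== VERDICT (by name: the statement is the Claim_ definition above) =====
theorem support_qubits_py_spec : Claim_equal_support_qubits_py := by
  intro labels _
  unfold Spec_support_qubits_py support_qubits_py support_qubits_py_alt
  by_cases hemp : labels.isEmpty
  · simp [hemp]
  · simp only [hemp, if_neg, Bool.false_eq_true, not_false_eq_true]
    set w : Nat := ((labels.map (fun s => s.toList.length)).min?).getD 0 with hw
    rw [portA_eq_filter]
    set ys := ((List.range w).filter (fun i => labels.any (fun l => l.toList.getD i 'I' != 'I'))).map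
      (fun i : Nat => (i : Int)) with hys
    set S := labels.foldl
        (fun s l =>
          (List.range w).foldl
            (fun s (i : Nat) =>
              if l.toList.getD i 'I' != 'I' then PySem.Set.add s (i : Int) else s) s)
        PySem.Set.empty with hS
    have hpmono : ys.Pairwise (· < ·) := by
      rw [hys]
      refine List.Pairwise.map _ (fun a b h => ?_) (List.Pairwise.filter _ (List.pairwise_lt_range))
      exact_mod_cast h
    have hynodup : ys.Nodup := hpmono.imp (fun h => ne_of_lt h)
    have hmem : ∀ y, y ∈ ys ↔ y ∈ S := by
      intro y
      rw [hS, mem_touched, hys]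
      simp only [List.mem_map, List.mem_filter]
      constructor
      · rintro ⟨i, ⟨hi, hq⟩, rfl⟩; exact ⟨i, hi, hq, rfl⟩
      · rintro ⟨i, hi, hq, rfl⟩; exact ⟨i, ⟨hi, hq⟩, rfl⟩
    have hperm : ys.Perm S :=
      (List.perm_ext_iff_of_nodup hynodup (nodup_touched labels w)).mpr hmem
    exact (PySem.List.sorted_eq_of_perm_of_pairwise_lt S ys (fun x : Int => x) hperm hpmono).symm
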